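-- pv_equiv track=rewrite | github.com/denmj/Algos-Euler | Euler-problems/problem_6.py | problem_6
-- ===== SOURCE A (Python) =====
-- def problem_6(num):
--     sum_of_sq = 0
--     sum = 0
--     for n in range(1, num+1):
--         sq = n * n
--         sum_of_sq += sq
--         sum += n
--         sq_of_sum = sum * sum
--         diff = sq_of_sum - sum_of_sq
--     return sum_of_sq, sq_of_sum, diff
-- ===== SOURCE B (Python) =====
-- def problem_6(num):
--     # Closed-form: arithmetic series and square-pyramidal formulas, O(1).
--     s = num * (num + 1) // 2
--     sum_of_sq = num * (num + 1) * (2 * num + 1) // 6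
--     sq_of_sum = s * s
--     return sum_of_sq, sq_of_sum, sq_of_sum - sum_of_sq
-- ===== Notes on version B (the rewrite author's own statement) =====
-- stated objective: faster
-- what changed: Replaces the O(n) accumulation loop with the closed-form arithmetic-series and square-pyramidal formulas, computing all three values in O(1).
import Mathlib
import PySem

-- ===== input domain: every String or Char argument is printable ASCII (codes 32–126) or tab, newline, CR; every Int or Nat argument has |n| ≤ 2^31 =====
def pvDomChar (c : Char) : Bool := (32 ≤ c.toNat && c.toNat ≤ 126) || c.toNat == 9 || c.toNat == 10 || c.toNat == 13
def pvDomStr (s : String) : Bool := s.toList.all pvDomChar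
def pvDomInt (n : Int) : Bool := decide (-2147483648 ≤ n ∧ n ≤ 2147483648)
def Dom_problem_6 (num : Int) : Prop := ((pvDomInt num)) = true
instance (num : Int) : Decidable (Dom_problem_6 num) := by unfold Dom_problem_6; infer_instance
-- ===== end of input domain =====

-- B replaces A's accumulation loop with closed-form sum formulas (one line, honest objective: faster).

-- ===== PORT A =====
-- loop state: (sum_of_sq, sum, sq_of_sum, diff); in Python sq_of_sum/diff start
-- unbound (Pre_ requires num ≥ 1, so the loop assigns them before the return)
def problem_6_step (st : Int × Int × Int × Int) (n : Int) : Int × Int × Int × Int :=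
  let sq := n * n
  let sum_of_sq := st.1 + sq
  let sum := st.2.1 + n
  let sq_of_sum := sum * sum
  (sum_of_sq, sum, sq_of_sum, sq_of_sum - sum_of_sq)

def problem_6 (num : Int) : List Int :=
  let st := (PySem.List.pyRange 1 (num + 1) 1).foldl problem_6_step (0, 0, 0, 0)
  [st.1, st.2.2.1, st.2.2.2]

-- ===== PORT B =====
def problem_6_alt (num : Int) : List Int :=
  let s := PySem.Int.floordiv (num * (num + 1)) 2
  let sum_of_sq := PySem.Int.floordiv (num * (num + 1) * (2 * num + 1)) 6
  let sq_of_sum := s * s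
  [sum_of_sq, sq_of_sum, sq_of_sum - sum_of_sq]

-- ===== PRECONDITION & SPEC =====
-- A raises NameError when num < 1 (the loop never binds sq_of_sum/diff)
def Pre_problem_6 (num : Int) : Prop := 1 ≤ num
instance (num : Int) : Decidable (Pre_problem_6 num) := by unfold Pre_problem_6; infer_instance
def pvWitness_problem_6 : Int := (10)

def Spec_problem_6 (num : Int) (out : List Int) : Prop := out = problem_6_alt num
instance (num : Int) (out : List Int) : Decidable (Spec_problem_6 num out) := by unfold Spec_problem_6; infer_instance

-- ===== CLAIM (what is proved, stated in full; the proofs are below) =====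
def Claim_equal_problem_6 : Prop := ∀ (num : Int), Dom_problem_6 num → Pre_problem_6 num → Spec_problem_6 num (problem_6 num)

-- ===== LEMMAS AND PROOFS =====
lemma pv_dvd2 (b : Int) : (2:Int) ∣ b * (b + 1) := by
  rcases Int.even_or_odd b with ⟨c, hc⟩ | ⟨c, hc⟩
  · exact ⟨c * (b + 1), by rw [hc]; ring⟩
  · exact ⟨b * (c + 1), by rw [hc]; ring⟩

lemma pv_dvd6 (b : Int) : (6:Int) ∣ b * (b + 1) * (2 * b + 1) := by
  obtain ⟨c, hc⟩ := pv_dvd2 b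
  have h3 : (3:Int) ∣ b * (b + 1) * (2 * b + 1) := by
    have : b % 3 = 0 ∨ b % 3 = 1 ∨ b % 3 = 2 := by omega
    rcases this with h | h | h <;>
      obtain ⟨q, hq⟩ : ∃ q, b = 3 * q + b % 3 := ⟨b / 3, by omega⟩
    · exact ⟨q * (b + 1) * (2 * b + 1), by rw [hq, h]; ring⟩
    · exact ⟨b * (b + 1) * (2 * q + 1), by rw [hq, h]; ring⟩
    · exact ⟨b * (q + 1) * (2 * b + 1), by rw [hq, h]; ring⟩
  obtain ⟨d, hd⟩ := h3
  -- from 2 ∣ b(b+1) and the factor 3: write b(b+1)(2b+1) = 6 * (c * (2b+1) - 2*d)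
  exact ⟨c * (2 * b + 1) - d, by linear_combination 3 * (2 * b + 1) * hc - 2 * hd⟩

lemma pv_div2_step (b : Int) : (b + 1) * (b + 1 + 1) / 2 = b * (b + 1) / 2 + (b + 1) := by
  obtain ⟨c, hc⟩ := pv_dvd2 b
  have h1 : b * (b + 1) / 2 = c := by rw [hc]; exact Int.mul_ediv_cancel_left c (by norm_num)
  have h2 : (b + 1) * (b + 1 + 1) = 2 * (c + (b + 1)) := by linear_combination hc
  rw [h1, h2, Int.mul_ediv_cancel_left _ (by norm_num : (2:Int) ≠ 0)]

lemma pv_div6_step (b : Int) :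
    (b + 1) * (b + 1 + 1) * (2 * (b + 1) + 1) / 6 =
      b * (b + 1) * (2 * b + 1) / 6 + (b + 1) * (b + 1) := by
  obtain ⟨c, hc⟩ := pv_dvd6 b
  have h1 : b * (b + 1) * (2 * b + 1) / 6 = c := by
    rw [hc]; exact Int.mul_ediv_cancel_left c (by norm_num)
  have h2 : (b + 1) * (b + 1 + 1) * (2 * (b + 1) + 1) = 6 * (c + (b + 1) * (b + 1)) := by
    linear_combination hc
  rw [h1, h2, Int.mul_ediv_cancel_left _ (by norm_num : (6:Int) ≠ 0)]

lemma problem_6_loop (m : Nat) :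
    (PySem.List.pyRange 1 (((m : Int) + 1) + 1) 1).foldl problem_6_step (0, 0, 0, 0) =
      (((m : Int) + 1) * ((m : Int) + 1 + 1) * (2 * ((m : Int) + 1) + 1) / 6,
       ((m : Int) + 1) * ((m : Int) + 1 + 1) / 2,
       (((m : Int) + 1) * ((m : Int) + 1 + 1) / 2) * (((m : Int) + 1) * ((m : Int) + 1 + 1) / 2),
       (((m : Int) + 1) * ((m : Int) + 1 + 1) / 2) * (((m : Int) + 1) * ((m : Int) + 1 + 1) / 2)
         - ((m : Int) + 1) * ((m : Int) + 1 + 1) * (2 * ((m : Int) + 1) + 1) / 6) := by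
  induction m with
  | zero => decide
  | succ k ih =>
    have hb : ((k + 1 : Nat) : Int) + 1 + 1 = (((k : Int) + 1) + 1) + 1 := by push_cast; ring
    rw [hb, PySem.List.pyRange_one_succ_right (by omega), List.foldl_append, ih]
    simp only [problem_6_step, List.foldl]
    have e2 := pv_div2_step ((k : Int) + 1)
    have e6 := pv_div6_step ((k : Int) + 1)
    push_cast
    simp only [Prod.mk.injEq]
    rw [e2, e6]
    exact ⟨rfl, rfl, rfl, rfl⟩

-- ===== VERDICT (by name: the statement is the Claim_ definition above) =====
theorem problem_6_spec : Claim_equal_problem_6 := by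
  intro num _ hpre
  have h1 : 1 ≤ num := hpre
  obtain ⟨m, rfl⟩ : ∃ m : Nat, num = (m : Int) + 1 := ⟨(num - 1).toNat, by omega⟩
  have hf2 : PySem.Int.floordiv (((m:Int)+1) * ((m:Int)+1+1)) 2
      = ((m:Int)+1) * ((m:Int)+1+1) / 2 := PySem.Int.floordiv_eq_ediv_of_pos (by norm_num)
  have hf6 : PySem.Int.floordiv (((m:Int)+1) * ((m:Int)+1+1) * (2*((m:Int)+1)+1)) 6
      = ((m:Int)+1) * ((m:Int)+1+1) * (2*((m:Int)+1)+1) / 6 :=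
    PySem.Int.floordiv_eq_ediv_of_pos (by norm_num)
  simp only [Spec_problem_6, problem_6, problem_6_alt]
  rw [problem_6_loop m, hf2, hf6]
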